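-- pv_equiv track=rewrite | github.com/davor3376-wq/JobAssist | backend/app/services/email_service.py | _rank_jobs
-- ===== SOURCE A (Python) =====
-- from typing import Any, Dict, List
--
-- def _rank_jobs(jobs: List[Dict[str, Any]], keywords: str, location: str) -> List[Dict[str, Any]]:
--     """Score and sort jobs by relevance to the alert's keywords and location."""
--     kw_terms = {t for t in keywords.lower().split() if len(t) > 2}
--     loc_lower = (location or "").lower()
--     scored = []
--     for job in jobs:
--         score = 0
--         title = (job.get("title") or "").lower()
--         company = job.get("company") or ""
--         job_loc = (job.get("location") or "").lower()
--         salary = job.get("salary_range") or job.get("salary") or ""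
--         # Keyword hit in title
--         for term in kw_terms:
--             if term in title:
--                 score += 3
--         # Salary listed = employer transparency
--         if salary:
--             score += 2
--         # Known company name
--         if company and company.lower() not in ("", "unbekannt", "unknown"):
--             score += 1
--         # Location match
--         if loc_lower and loc_lower in job_loc:
--             score += 2
--         scored.append((score, job))
--     scored.sort(key=lambda x: x[0], reverse=True)
--     return [j for _, j in scored]
-- ===== SOURCE B (Python) =====
-- from typing import Any, Dict, List
--
-- def _score_job(job: Dict[str, Any], kw_terms, loc_lower: str) -> int:
--     score = 0
--     title = (job.get("title") or "").lower()
--     company = job.get("company") or ""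
--     job_loc = (job.get("location") or "").lower()
--     salary = job.get("salary_range") or job.get("salary") or ""
--     for term in kw_terms:
--         if term in title:
--             score += 3
--     if salary:
--         score += 2
--     if company and company.lower() not in ("", "unbekannt", "unknown"):
--         score += 1
--     if loc_lower and loc_lower in job_loc:
--         score += 2
--     return score
--
-- def _rank_jobs(jobs: List[Dict[str, Any]], keywords: str, location: str) -> List[Dict[str, Any]]:
--     """Bucket the jobs by score, then emit buckets from highest to lowest score."""
--     kw_terms = {t for t in keywords.lower().split() if len(t) > 2}
--     loc_lower = (location or "").lower()
--     buckets: Dict[int, list] = {}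
--     for job in jobs:
--         score = _score_job(job, kw_terms, loc_lower)
--         buckets[score] = buckets.get(score, []) + [job]
--     out = []
--     for s in sorted(buckets, reverse=True):
--         out.extend(buckets[s])
--     return out
-- ===== Notes on version B (the rewrite author's own statement) =====
-- stated objective: alternative
-- what changed: B replaces A's collect-pairs-then-stable-reverse-sort with a grouping pass that appends each job to a dict bucket keyed by its integer score and then concatenates the buckets in descending score order (a bucket sort over the scores instead of a comparison sort).
import Mathlib
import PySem

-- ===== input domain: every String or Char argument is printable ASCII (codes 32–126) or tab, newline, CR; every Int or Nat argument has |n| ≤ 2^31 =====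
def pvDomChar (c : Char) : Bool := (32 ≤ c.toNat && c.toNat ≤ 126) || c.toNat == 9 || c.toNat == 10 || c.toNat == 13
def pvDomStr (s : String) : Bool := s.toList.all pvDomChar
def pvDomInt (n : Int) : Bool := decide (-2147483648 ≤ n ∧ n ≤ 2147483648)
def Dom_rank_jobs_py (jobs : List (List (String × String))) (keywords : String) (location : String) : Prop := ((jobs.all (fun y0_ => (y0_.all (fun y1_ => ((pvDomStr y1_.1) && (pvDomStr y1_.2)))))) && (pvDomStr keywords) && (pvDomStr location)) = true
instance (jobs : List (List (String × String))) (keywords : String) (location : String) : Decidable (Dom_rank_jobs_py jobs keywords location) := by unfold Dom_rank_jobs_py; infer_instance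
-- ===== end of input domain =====

-- B replaces the stable reverse comparison sort of (score, job) pairs by grouping jobs into
-- score buckets and emitting the buckets in descending score order (objective: alternative).

-- ===== PORT A =====
-- shared helper: the per-job scoring lines, identical in Source A and Source B
def pvScoreJob (job : List (String × String)) (kw_terms : PySem.Set String) (loc_lower : String) : Int :=
  let d := PySem.Dict.mk job
  let title := PySem.Str.lower ((d.get? "title").getD "")       -- (job.get("title") or "").lower()
  let company := (d.get? "company").getD ""                     -- job.get("company") or ""
  let job_loc := PySem.Str.lower ((d.get? "location").getD "")
  let s1 := (d.get? "salary_range").getD ""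
  let salary := if s1 = "" then (d.get? "salary").getD "" else s1   -- or-chain on strings: "" is falsy
  let score : Int := kw_terms.foldl (fun sc term => if PySem.Str.isIn term title then sc + 3 else sc) 0
  let score := if salary ≠ "" then score + 2 else score
  let score := if company ≠ "" ∧ (["", "unbekannt", "unknown"].contains (PySem.Str.lower company)) = false then score + 1 else score
  let score := if loc_lower ≠ "" ∧ PySem.Str.isIn loc_lower job_loc = true then score + 2 else score
  score

def rank_jobs_py (jobs : List (List (String × String))) (keywords : String) (location : String) : List (List (String × String)) :=
  let kw_terms : PySem.Set String := PySem.Set.ofList ((PySem.Str.split₀ (PySem.Str.lower keywords)).filter (fun t => decide (2 < PySem.Str.len t)))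
  let loc_lower := PySem.Str.lower location    -- (location or "").lower(): identity fallback for a str argument
  let scored := jobs.foldl (fun acc job => acc ++ [(pvScoreJob job kw_terms loc_lower, job)]) []
  let sortedScored := PySem.List.sorted scored (fun x => x.1) true
  sortedScored.map (fun x => x.2)

-- ===== PORT B =====
def rank_jobs_py_alt (jobs : List (List (String × String))) (keywords : String) (location : String) : List (List (String × String)) :=
  let kw_terms : PySem.Set String := PySem.Set.ofList ((PySem.Str.split₀ (PySem.Str.lower keywords)).filter (fun t => decide (2 < PySem.Str.len t)))
  let loc_lower := PySem.Str.lower location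
  let buckets := jobs.foldl
    (fun d job => d.modify (pvScoreJob job kw_terms loc_lower) ([] : List (List (String × String))) (fun b => b ++ [job]))
    PySem.Dict.empty
  (PySem.List.sorted buckets.keys (fun k => k) true).foldl (fun out s => out ++ buckets.getD s []) []

-- ===== PRECONDITION & SPEC =====
def Spec_rank_jobs_py (jobs : List (List (String × String))) (keywords : String) (location : String) (out : List (List (String × String))) : Prop := out = rank_jobs_py_alt jobs keywords location
instance (jobs : List (List (String × String))) (keywords : String) (location : String) (out : List (List (String × String))) : Decidable (Spec_rank_jobs_py jobs keywords location out) := by unfold Spec_rank_jobs_py; infer_instance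

-- ===== CLAIM (what is proved, stated in full; the proofs are below) =====
def Claim_equal_rank_jobs_py : Prop := ∀ (jobs : List (List (String × String))) (keywords : String) (location : String), Dom_rank_jobs_py jobs keywords location → Spec_rank_jobs_py jobs keywords location (rank_jobs_py jobs keywords location)

-- ===== LEMMAS AND PROOFS =====

-- insertBy lands right before the first element that 'before' accepts
lemma pv_insertBy_split {α : Type} (before : α → α → Bool) (x : α) (ys zs : List α)
    (h1 : ∀ y ∈ ys, before x y = false) (h2 : ∀ z ∈ zs, before x z = true) :
    PySem.List.insertBy before x (ys ++ zs) = ys ++ x :: zs := by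
  induction ys with
  | nil =>
    cases zs with
    | nil => simp [PySem.List.insertBy]
    | cons z t => simp [PySem.List.insertBy, h2 z (by simp)]
  | cons y ys ih =>
    simp only [List.cons_append, PySem.List.insertBy, h1 y (by simp)]
    simp only [Bool.false_eq_true, if_false]
    rw [ih (fun y hy => h1 y (by simp [hy])) ]

-- appending one element to the input inserts it into the reverse-sorted output
lemma pv_sorted_rev_append {α : Type} (l : List α) (x : α) (key : α → Int) :
    PySem.List.sorted (l ++ [x]) key true
      = PySem.List.insertBy (fun a b => decide (key b < key a)) x (PySem.List.sorted l key true) := by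
  rw [PySem.List.sorted_rev_eq_foldl_insertBy, PySem.List.sorted_rev_eq_foldl_insertBy, List.foldl_append]
  rfl

-- sorted(set(xs), reverse=True) is strictly decreasing
lemma pv_pairwise_gt (xs : List Int) :
    (PySem.List.sorted (PySem.Set.ofList xs) (fun k => k) true).Pairwise (fun a b => b < a) := by
  have h1 := PySem.List.sorted_pairwise_rev (xs := PySem.Set.ofList xs) (key := fun k => k)
  have h2 : (PySem.List.sorted (PySem.Set.ofList xs) (fun k => k) true).Nodup :=
    (PySem.List.sorted_perm (PySem.Set.ofList xs) (fun k => k) true).nodup_iff.mpr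
      (PySem.Set.nodup_ofList xs)
  exact (h1.and h2).imp (fun h => lt_of_le_of_ne h.1 h.2.symm)

lemma pv_dropWhile_mem (K : List Int) (s : Int)
    (hp : K.Pairwise (fun a b => b < a)) (hs : s ∈ K) :
    ∃ K2, K.dropWhile (fun k => decide (s < k)) = s :: K2 ∧ ∀ k ∈ K2, k < s := by
  induction K with
  | nil => cases hs
  | cons a t ih =>
    rw [List.pairwise_cons] at hp
    by_cases h : s < a
    · have hst : s ∈ t := by
        rcases List.mem_cons.mp hs with h' | h'
        · omega
        · exact h'
      rw [List.dropWhile_cons_of_pos (by simpa using h)]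
      exact ih hp.2 hst
    · rw [List.dropWhile_cons_of_neg (by simpa using h)]
      have hsa : s = a := by
        rcases List.mem_cons.mp hs with h' | h'
        · exact h'
        · exact absurd (hp.1 s h') h
      exact ⟨t, by rw [hsa], fun k hk => by have := hp.1 k hk; omega⟩

lemma pv_dropWhile_not_mem (K : List Int) (s : Int)
    (hp : K.Pairwise (fun a b => b < a)) (hns : s ∉ K) :
    ∀ k ∈ K.dropWhile (fun k => decide (s < k)), k < s := by
  induction K with
  | nil => intro k hk; cases hk
  | cons a t ih =>
    rw [List.pairwise_cons] at hp
    by_cases h : s < a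
    · rw [List.dropWhile_cons_of_pos (by simpa using h)]
      exact ih hp.2 (fun h' => hns (by simp [h']))
    · rw [List.dropWhile_cons_of_neg (by simpa using h)]
      have ha : a < s := lt_of_le_of_ne (by omega) (fun h' => hns (by simp [h']))
      intro k hk
      rcases List.mem_cons.mp hk with hk | hk
      · omega
      · have := hp.1 k hk; omega

lemma pv_flatMap_congr {α β : Type} (l : List α) (f g : α → List β)
    (h : ∀ a ∈ l, f a = g a) : l.flatMap f = l.flatMap g := by
  induction l with
  | nil => rfl
  | cons a t ih =>
    simp only [List.flatMap_cons, h a (by simp), ih (fun a ha => h a (by simp [ha]))]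

lemma pv_fst_of_mem_flatMap {α : Type} (l : List (Int × α)) (Ks : List Int) (z : Int × α)
    (hz : z ∈ Ks.flatMap (fun k => l.filter (fun p => p.1 == k))) : z.1 ∈ Ks := by
  simp only [List.mem_flatMap, List.mem_filter, beq_iff_eq] at hz
  obtain ⟨k, hk, _, he⟩ := hz
  rwa [he]

-- MAIN: the stable reverse sort by first component equals bucket-by-bucket emission
lemma pv_sorted_eq_buckets {α : Type} (l : List (Int × α)) :
    PySem.List.sorted l (fun p => p.1) true
      = (PySem.List.sorted (PySem.Set.ofList (l.map (fun p => p.1))) (fun k => k) true).flatMap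
          (fun k => l.filter (fun p => p.1 == k)) := by
  induction l using List.reverseRecOn with
  | nil => rfl
  | append_singleton l x ih =>
    have hK := pv_pairwise_gt (l.map (fun p => p.1))
    set K := PySem.List.sorted (PySem.Set.ofList (l.map (fun p => p.1))) (fun k => k) true with hKdef
    have hmap : (l ++ [x]).map (fun p => p.1) = l.map (fun p => p.1) ++ [x.1] := by simp
    have hfil : ∀ k : Int, (l ++ [x]).filter (fun p => p.1 == k)
        = l.filter (fun p => p.1 == k) ++ (if x.1 == k then [x] else []) := by
      intro k
      by_cases h : x.1 = k <;> simp [List.filter_append, h]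
    set K1 := K.takeWhile (fun k => decide (x.1 < k)) with hK1def
    have hK1 : ∀ k ∈ K1, x.1 < k := fun k hk => by
      have := List.mem_takeWhile_imp hk; simpa using this
    have hg1 : K1.flatMap (fun k => (l ++ [x]).filter (fun p => p.1 == k))
        = K1.flatMap (fun k => l.filter (fun p => p.1 == k)) := by
      refine pv_flatMap_congr _ _ _ (fun k hk => ?_)
      rw [hfil k]
      have hne : (x.1 == k) = false := by have := hK1 k hk; simp; omega
      simp [hne]
    by_cases hmem : x.1 ∈ l.map (fun p => p.1)
    · -- x's score already has a bucket: x is appended to that bucket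
      have hset : PySem.Set.ofList ((l ++ [x]).map (fun p => p.1)) = PySem.Set.ofList (l.map (fun p => p.1)) := by
        rw [hmap, PySem.Set.ofList_append_singleton, PySem.Set.add_of_mem (by rw [PySem.Set.mem_ofList]; exact hmem)]
      obtain ⟨K2, hd, hK2⟩ := pv_dropWhile_mem K x.1 hK
        (by rw [hKdef, PySem.List.mem_sorted, PySem.Set.mem_ofList]; exact hmem)
      have hsplit : K = K1 ++ (x.1 :: K2) := by
        rw [hK1def, ← hd, List.takeWhile_append_dropWhile]
      have hg2 : K2.flatMap (fun k => (l ++ [x]).filter (fun p => p.1 == k))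
          = K2.flatMap (fun k => l.filter (fun p => p.1 == k)) := by
        refine pv_flatMap_congr _ _ _ (fun k hk => ?_)
        rw [hfil k]
        have hne : (x.1 == k) = false := by have := hK2 k hk; simp; omega
        simp [hne]
      rw [pv_sorted_rev_append, ih, hset, ← hKdef, hsplit]
      rw [List.flatMap_append, List.flatMap_cons, List.flatMap_append, List.flatMap_cons]
      rw [hg1, hg2, hfil x.1]
      rw [← List.append_assoc]
      rw [pv_insertBy_split _ x
        (ys := K1.flatMap (fun k => l.filter (fun p => p.1 == k)) ++ l.filter (fun p => p.1 == x.1))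
        (zs := K2.flatMap (fun k => l.filter (fun p => p.1 == k)))
        (by
          intro y hy
          rcases List.mem_append.mp hy with hy | hy
          · have hmemK1 : y.1 ∈ K1 := pv_fst_of_mem_flatMap l K1 y hy
            have := hK1 _ hmemK1
            simp only [decide_eq_false_iff_not]; omega
          · have : y.1 = x.1 := by
              have := List.mem_filter.mp hy; simpa using this.2
            simp [this])
        (by
          intro z hz
          have hmemK2 : z.1 ∈ K2 := pv_fst_of_mem_flatMap l K2 z hz
          have := hK2 _ hmemK2
          simpa using this)]
      simp [List.append_assoc]
    · -- fresh score: a new singleton bucket is created at its sorted position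
      have hnotK : x.1 ∉ K := by
        rw [hKdef, PySem.List.mem_sorted, PySem.Set.mem_ofList]; exact hmem
      have hsplitK : K = K1 ++ K.dropWhile (fun k => decide (x.1 < k)) := by
        rw [hK1def, List.takeWhile_append_dropWhile]
      set K2 := K.dropWhile (fun k => decide (x.1 < k)) with hK2def
      have hK2 : ∀ k ∈ K2, k < x.1 := pv_dropWhile_not_mem K x.1 hK hnotK
      have hset : PySem.Set.ofList ((l ++ [x]).map (fun p => p.1))
          = PySem.Set.ofList (l.map (fun p => p.1)) ++ [x.1] := by
        rw [hmap, PySem.Set.ofList_append_singleton, PySem.Set.add_of_not_mem (by rw [PySem.Set.mem_ofList]; exact hmem)]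
      have hK' : PySem.List.sorted (PySem.Set.ofList ((l ++ [x]).map (fun p => p.1))) (fun k => k) true
          = K1 ++ x.1 :: K2 := by
        rw [hset, pv_sorted_rev_append _ _ (fun k => k), ← hKdef, hsplitK]
        refine pv_insertBy_split _ _ _ _ (fun k hk => ?_) (fun k hk => ?_)
        · have := hK1 k hk; simp only [decide_eq_false_iff_not]; omega
        · have := hK2 k hk; simpa using this
      have hgx : l.filter (fun p => p.1 == x.1) = [] := by
        rw [List.filter_eq_nil_iff]
        intro p hp
        simp only [beq_iff_eq]
        intro he
        exact hmem (by rw [← he]; exact List.mem_map_of_mem hp)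
      have hg2 : K2.flatMap (fun k => (l ++ [x]).filter (fun p => p.1 == k))
          = K2.flatMap (fun k => l.filter (fun p => p.1 == k)) := by
        refine pv_flatMap_congr _ _ _ (fun k hk => ?_)
        rw [hfil k]
        have hne : (x.1 == k) = false := by have := hK2 k hk; simp; omega
        simp [hne]
      rw [pv_sorted_rev_append, ih, hK', hsplitK]
      rw [List.flatMap_append, List.flatMap_append, List.flatMap_cons]
      rw [hg1, hg2, hfil x.1, hgx]
      rw [pv_insertBy_split _ x
        (ys := K1.flatMap (fun k => l.filter (fun p => p.1 == k)))
        (zs := K2.flatMap (fun k => l.filter (fun p => p.1 == k)))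
        (by
          intro y hy
          have hmemK1 : y.1 ∈ K1 := pv_fst_of_mem_flatMap l K1 y hy
          have := hK1 _ hmemK1
          simp only [decide_eq_false_iff_not]; omega)
        (by
          intro z hz
          have hmemK2 : z.1 ∈ K2 := pv_fst_of_mem_flatMap l K2 z hz
          have := hK2 _ hmemK2
          simpa using this)]
      simp

-- A's pipeline equals B's pipeline for an arbitrary per-element score function
lemma pv_ports_agree {α : Type} (jobs : List α) (f : α → Int) :
    (PySem.List.sorted (jobs.foldl (fun acc job => acc ++ [(f job, job)]) []) (fun x => x.1) true).map (fun x => x.2)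
      = (PySem.List.sorted
            (jobs.foldl (fun d job => d.modify (f job) ([] : List α) (fun b => b ++ [job])) PySem.Dict.empty).keys
            (fun k => k) true).foldl
          (fun out s => out ++ (jobs.foldl (fun d job => d.modify (f job) ([] : List α) (fun b => b ++ [job])) PySem.Dict.empty).getD s []) [] := by
  have hsc : jobs.foldl (fun acc job => acc ++ [(f job, job)]) ([] : List (Int × α))
      = jobs.map (fun j => (f j, j)) := by
    simpa using PySem.List.foldl_append_singleton_eq_map (l := jobs) (f := fun j => (f j, j)) (acc := [])
  have hbuck : jobs.foldl (fun d job => d.modify (f job) ([] : List α) (fun b => b ++ [job])) PySem.Dict.empty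
      = (jobs.map (fun j => (f j, j))).foldl (fun d p => d.modify p.1 [] (fun b => b ++ [p.2])) PySem.Dict.empty := by
    rw [List.foldl_map]
  have hkeys : ((jobs.map (fun j => (f j, j))).foldl (fun d p => d.modify p.1 [] (fun b => b ++ [p.2])) PySem.Dict.empty).keys
      = PySem.Set.ofList ((jobs.map (fun j => (f j, j))).map (fun p => p.1)) := by
    rw [PySem.Dict.keys_foldl_modify_key (jobs.map (fun j => (f j, j))) (fun p => p.1) [] (fun _ p => fun b => b ++ [p.2]) PySem.Dict.empty]
    simp [PySem.Set.update_nil_left]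
  have hgetD : ∀ k : Int, ((jobs.map (fun j => (f j, j))).foldl (fun d p => d.modify p.1 [] (fun b => b ++ [p.2])) PySem.Dict.empty).getD k []
      = ((jobs.map (fun j => (f j, j))).filter (fun p => p.1 == k)).map (fun p => p.2) := by
    intro k
    simpa using PySem.Dict.getD_foldl_modify_append (jobs.map (fun j => (f j, j))) PySem.Dict.empty k
  rw [hsc, hbuck, hkeys, pv_sorted_eq_buckets, List.map_flatMap]
  rw [show (PySem.List.sorted (PySem.Set.ofList ((jobs.map (fun j => (f j, j))).map (fun p => p.1))) (fun k => k) true).foldl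
        (fun out s => out ++ ((jobs.map (fun j => (f j, j))).foldl (fun d p => d.modify p.1 [] (fun b => b ++ [p.2])) PySem.Dict.empty).getD s []) []
      = [] ++ (PySem.List.sorted (PySem.Set.ofList ((jobs.map (fun j => (f j, j))).map (fun p => p.1))) (fun k => k) true).flatMap
          (fun s => ((jobs.map (fun j => (f j, j))).foldl (fun d p => d.modify p.1 [] (fun b => b ++ [p.2])) PySem.Dict.empty).getD s [])
      from PySem.List.foldl_append_eq_flatMap _ _ _]
  rw [List.nil_append]
  exact pv_flatMap_congr _ _ _ (fun k _ => (hgetD k).symm)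

-- ===== VERDICT (by name: the statement is the Claim_ definition above) =====
theorem rank_jobs_py_spec : Claim_equal_rank_jobs_py := by
  intro jobs keywords location _
  unfold Spec_rank_jobs_py rank_jobs_py rank_jobs_py_alt
  exact pv_ports_agree jobs
    (fun job => pvScoreJob job
      (PySem.Set.ofList ((PySem.Str.split₀ (PySem.Str.lower keywords)).filter (fun t => decide (2 < PySem.Str.len t))))
      (PySem.Str.lower location))
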